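-- pv_equiv track=rewrite | github.com/m0mt/Algorithm-practice | python/backjoon/2231.py | solution
-- ===== SOURCE A (Python) =====
-- def solution(N):
--     for i in range(1, N + 1):
--         result = 0
--         result += i
--         for j in str(i):
--             result += int(j)
--         if result == N:
--             return i
--     return 0
-- ===== SOURCE B (Python) =====
-- def solution(N):
--     # Any i in [1, N] with N <= 2**31 has at most 10 digits, so its digit
--     # sum s = N - i is at most 90.  Instead of scanning all of [1, N], try
--     # each possible digit sum s from 90 down to 0 (largest s = smallest i)
--     # and check the single candidate i = N - s arithmetically.
--     def digit_sum(i):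
--         s = 0
--         while i:
--             s += i % 10
--             i //= 10
--         return s
--     for s in range(90, -1, -1):
--         i = N - s
--         if i >= 1 and digit_sum(i) == s:
--             return i
--     return 0
-- ===== Notes on version B (the rewrite author's own statement) =====
-- stated objective: faster
-- what changed: Instead of scanning every i from 1 to N and summing digits via str(i), B enumerates the at most 91 possible digit sums s (0..90 for 32-bit N) from largest to smallest and checks the single candidate i = N - s with an arithmetic digit sum.
import Mathlib
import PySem

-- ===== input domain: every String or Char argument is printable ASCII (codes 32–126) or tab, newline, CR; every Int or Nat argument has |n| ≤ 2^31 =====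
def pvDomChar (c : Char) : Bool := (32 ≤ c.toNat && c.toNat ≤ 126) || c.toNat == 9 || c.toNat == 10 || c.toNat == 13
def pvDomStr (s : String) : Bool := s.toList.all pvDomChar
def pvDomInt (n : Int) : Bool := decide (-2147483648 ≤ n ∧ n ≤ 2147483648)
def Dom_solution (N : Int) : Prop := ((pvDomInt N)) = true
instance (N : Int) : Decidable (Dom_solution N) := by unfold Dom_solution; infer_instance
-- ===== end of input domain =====

-- B replaces A's scan of all of [1, N] (digit sum via str) by trying the ≤ 91
-- possible digit sums s = 90..0 with one arithmetic check each: faster by the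
-- timing run (asymptotic on the 32-bit domain the claim covers).

-- ===== PORT A =====
-- 'for i in range(1, N+1): … return i' with a final 'return 0', as structural
-- recursion over the range list.  int(j) on a char j of str(i) is
-- PySem.Int.ofChars? [j]; for i ≥ 1 every char of str(i) is a decimal digit, so
-- int() never raises there and the .getD 0 default is never taken.
def solutionLoopA (N : Int) : List Int → Int
  | [] => 0
  | i :: rest =>
    let result : Int :=
      (PySem.Int.toChars i).foldl (fun r j => r + (PySem.Int.ofChars? [j]).getD 0) (0 + i)
    if result = N then i else solutionLoopA N rest

def solution (N : Int) : Int := solutionLoopA N (PySem.List.pyRange 1 (N + 1) 1)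

-- ===== PORT B =====
-- Source B's digit_sum is only ever called with i ≥ 1 (the 'i >= 1 and' guard
-- short-circuits); on a nonnegative int Python's 'while i: s += i % 10; i //= 10'
-- is exactly this structural recursion on i.toNat (i % 10 = ↑(i.toNat % 10) and
-- i // 10 = ↑(i.toNat / 10) for 0 ≤ i).
def digitSumB (n : Nat) : Int :=
  if _h : n = 0 then 0 else (↑(n % 10) : Int) + digitSumB (n / 10)
decreasing_by exact Nat.div_lt_self (Nat.pos_of_ne_zero _h) (by omega)

-- 'for s in range(90, -1, -1): … return i' with a final 'return 0'
def solutionLoopB (N : Int) : List Int → Int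
  | [] => 0
  | s :: rest =>
    let i := N - s
    if 1 ≤ i ∧ digitSumB i.toNat = s then i else solutionLoopB N rest

def solution_alt (N : Int) : Int := solutionLoopB N (PySem.List.pyRange 90 (-1) (-1))

-- ===== PRECONDITION & SPEC =====
def Spec_solution (N : Int) (out : Int) : Prop := out = solution_alt N
instance (N : Int) (out : Int) : Decidable (Spec_solution N out) := by unfold Spec_solution; infer_instance

-- ===== CLAIM (what is proved, stated in full; the proofs are below) =====
def Claim_equal_solution : Prop := ∀ (N : Int), Dom_solution N → Spec_solution N (solution N)

-- ===== LEMMAS AND PROOFS =====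

-- value of int(j) for a digit char j, as used by A's inner loop
def charVal (j : Char) : Int := (PySem.Int.ofChars? [j]).getD 0

lemma charVal_digitChar (d : Nat) (hd : d < 10) : charVal (Nat.digitChar d) = (d : Int) := by
  interval_cases d <;> decide

lemma digitSumB_zero : digitSumB 0 = 0 := by simp [digitSumB]

lemma digitSumB_of_ne (n : Nat) (h : n ≠ 0) :
    digitSumB n = (↑(n % 10) : Int) + digitSumB (n / 10) := by
  rw [digitSumB]; simp [h]

-- string digit sum (A) = arithmetic digit sum (B), through toDigitsCore's fuel
lemma sum_toDigitsCore (f : Nat) : ∀ (n : Nat) (l : List Char), n < f →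
    (((Nat.toDigitsCore 10 f n l).map charVal).sum : Int)
      = digitSumB n + ((l.map charVal).sum : Int) := by
  induction f with
  | zero => intro n l h; omega
  | succ f ih =>
    intro n l h
    rw [Nat.toDigitsCore]
    by_cases h0 : n / 10 = 0
    · simp only [h0, if_true]
      rcases Nat.eq_zero_or_pos n with rfl | hn
      · simp [charVal_digitChar 0 (by omega), digitSumB_zero]
      · rw [digitSumB_of_ne n (by omega), h0, digitSumB_zero]
        simp [charVal_digitChar (n % 10) (Nat.mod_lt n (by omega))]
    · simp only [h0, if_false]
      rw [ih (n / 10) _ (by omega)]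
      rw [digitSumB_of_ne n (by omega)]
      simp [charVal_digitChar (n % 10) (Nat.mod_lt n (by omega))]
      ring

-- A's inner accumulation, for i ≥ 1
lemma resultA_eq (i : Int) (hi : 1 ≤ i) :
    (PySem.Int.toChars i).foldl (fun r j => r + (PySem.Int.ofChars? [j]).getD 0) (0 + i)
      = i + digitSumB i.toNat := by
  have h1 : (PySem.Int.toChars i) = Nat.toDigits 10 i.toNat := by
    simp [PySem.Int.toChars, show ¬ i < 0 by omega]
  have h2 : (fun r j => r + (PySem.Int.ofChars? [j]).getD 0)
      = (fun (r : Int) (j : Char) => r + charVal j) := rfl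
  rw [h1, h2, PySem.List.foldl_add, Nat.toDigits,
      sum_toDigitsCore (i.toNat + 1) i.toNat [] (by omega)]
  simp

-- the digit sum of a number below 10^e is at most 9e
lemma digitSumB_le (e : Nat) : ∀ n : Nat, n < 10 ^ e → digitSumB n ≤ 9 * e := by
  induction e with
  | zero => intro n h; interval_cases n; simp [digitSumB_zero]
  | succ e ih =>
    intro n h
    rcases Nat.eq_zero_or_pos n with rfl | hn
    · simp [digitSumB_zero]; positivity
    · rw [digitSumB_of_ne n (by omega)]
      have hd : n / 10 < 10 ^ e :=
        Nat.div_lt_of_lt_mul (by rw [← pow_succ']; exact h)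
      have := ih (n / 10) hd
      have hm : (↑(n % 10) : Int) ≤ 9 := by
        have := Nat.mod_lt n (show 0 < 10 by omega)
        omega
      push_cast
      omega

-- the common reference scan: first i in xs with 1 ≤ i and i + digitsum(i) = N, else 0
def scanP (N : Int) : List Int → Int
  | [] => 0
  | i :: rest => if 1 ≤ i ∧ i + digitSumB i.toNat = N then i else scanP N rest

lemma loopA_eq_scan (N : Int) (xs : List Int) (hxs : ∀ i ∈ xs, 1 ≤ i) :
    solutionLoopA N xs = scanP N xs := by
  induction xs with
  | nil => rfl
  | cons i rest ih =>
    have hi : 1 ≤ i := hxs i (by simp)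
    rw [solutionLoopA, scanP]
    simp only [resultA_eq i hi]
    have : ((i + digitSumB i.toNat = N)) ↔ (1 ≤ i ∧ i + digitSumB i.toNat = N) := by
      constructor
      · exact fun h => ⟨hi, h⟩
      · exact fun h => h.2
    split_ifs with h1 h2 h2
    · rfl
    · exact absurd (this.mp h1) h2
    · exact absurd (this.mpr h2) h1
    · exact ih (fun j hj => hxs j (by simp [hj]))

lemma loopB_eq_scan (N : Int) (ss : List Int) :
    solutionLoopB N ss = scanP N (ss.map (fun s => N - s)) := by
  induction ss with
  | nil => rfl
  | cons s rest ih =>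
    rw [solutionLoopB, List.map_cons, scanP]
    have : (1 ≤ N - s ∧ digitSumB (N - s).toNat = s)
        ↔ (1 ≤ N - s ∧ (N - s) + digitSumB (N - s).toNat = N) := by
      constructor <;> exact fun h => ⟨h.1, by omega⟩
    split_ifs with h1 h2 h2
    · rfl
    · exact absurd (this.mp h1) h2
    · exact absurd (this.mpr h2) h1
    · exact ih

lemma map_countdown (N : Int) :
    (PySem.List.pyRange 90 (-1) (-1)).map (fun s => N - s)
      = PySem.List.pyRange (N - 90) (N + 1) 1 := by
  rw [PySem.List.pyRange_neg_one, PySem.List.pyRange_one, List.map_map]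
  have h1 : ((90 : Int) - (-1)).toNat = 91 := by decide
  have h2 : ((N + 1) - (N - 90)).toNat = 91 := by omega
  rw [h1, h2]
  exact List.map_congr_left (fun k _ => by simp [Function.comp]; ring)

lemma scan_none (N : Int) (xs : List Int)
    (h : ∀ i ∈ xs, ¬ (1 ≤ i ∧ i + digitSumB i.toNat = N)) : scanP N xs = 0 := by
  induction xs with
  | nil => rfl
  | cons i rest ih =>
    rw [scanP, if_neg (h i (by simp))]
    exact ih (fun j hj => h j (by simp [hj]))

lemma scan_append (N : Int) (xs ys : List Int)
    (h : ∀ i ∈ xs, ¬ (1 ≤ i ∧ i + digitSumB i.toNat = N)) :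
    scanP N (xs ++ ys) = scanP N ys := by
  induction xs with
  | nil => rfl
  | cons i rest ih =>
    rw [List.cons_append, scanP, if_neg (h i (by simp))]
    exact ih (fun j hj => h j (by simp [hj]))

lemma scan_window (N : Int) (hDom : -2147483648 ≤ N ∧ N ≤ 2147483648) :
    scanP N (PySem.List.pyRange 1 (N + 1) 1)
      = scanP N (PySem.List.pyRange (N - 90) (N + 1) 1) := by
  by_cases hN : N ≤ 0
  · rw [PySem.List.pyRange_one_eq_nil (show N + 1 ≤ 1 by omega)]
    rw [scanP, scan_none]
    intro i hi
    have := PySem.List.mem_pyRange_one.mp hi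
    omega
  · by_cases hsmall : N - 90 ≤ 1
    · rw [PySem.List.pyRange_one_append (N - 90) 1 (N + 1) hsmall (by omega),
        scan_append]
      intro i hi
      have := PySem.List.mem_pyRange_one.mp hi
      omega
    · rw [PySem.List.pyRange_one_append 1 (N - 90) (N + 1) (by omega) (by omega),
        scan_append]
      intro i hi
      have hmem := PySem.List.mem_pyRange_one.mp hi
      rintro ⟨h1, h2⟩
      have hlt : i.toNat < 10 ^ 10 := by
        have : (10 : Nat) ^ 10 = 10000000000 := by norm_num
        omega
      have := digitSumB_le 10 i.toNat hlt
      omega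

-- ===== VERDICT (by name: the statement is the Claim_ definition above) =====
theorem solution_spec : Claim_equal_solution := by
  intro N hDom
  have hD : -2147483648 ≤ N ∧ N ≤ 2147483648 := by
    have := of_decide_eq_true hDom
    exact this
  unfold Spec_solution solution solution_alt
  rw [loopA_eq_scan N _ (fun i hi => (PySem.List.mem_pyRange_one.mp hi).1),
    loopB_eq_scan, map_countdown, scan_window N hD]
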